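-- pv_equiv track=rewrite | github.com/pypi-data/pypi-mirror-379 | packages/lace-client/lace_client-0.7.5-py3-none-any.whl/lace/sds/scanner.py | _detect_modalities_from_extensions
-- ===== SOURCE A (Python) =====
-- from typing import Any, Dict, List, Optional
--
-- def _detect_modalities_from_extensions(
--     extensions: Dict[str, int]
-- ) -> Dict[str, bool]:
--     """Detect modalities from file extensions."""
--     modalities = {
--         "text": False,
--         "image": False,
--         "audio": False,
--         "video": False,
--         "other": False,
--     }
--
--     # Extension to modality mapping
--     text_exts = {".txt", ".md", ".json", ".jsonl", ".csv", ".tsv", ".xml", ".html"}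
--     image_exts = {".jpg", ".jpeg", ".png", ".gif", ".bmp", ".svg", ".webp", ".tiff"}
--     audio_exts = {".mp3", ".wav", ".flac", ".ogg", ".m4a", ".aac", ".wma"}
--     video_exts = {".mp4", ".avi", ".mov", ".mkv", ".webm", ".flv", ".wmv", ".mpg"}
--
--     for ext in extensions:
--         ext_lower = ext.lower()
--         if ext_lower in text_exts:
--             modalities["text"] = True
--         elif ext_lower in image_exts:
--             modalities["image"] = True
--         elif ext_lower in audio_exts:
--             modalities["audio"] = True
--         elif ext_lower in video_exts:
--             modalities["video"] = True
--         else: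
--             modalities["other"] = True
--
--     return modalities
-- ===== SOURCE B (Python) =====
-- _CATEGORIES = (
--     ("text", frozenset({".txt", ".md", ".json", ".jsonl", ".csv", ".tsv", ".xml", ".html"})),
--     ("image", frozenset({".jpg", ".jpeg", ".png", ".gif", ".bmp", ".svg", ".webp", ".tiff"})),
--     ("audio", frozenset({".mp3", ".wav", ".flac", ".ogg", ".m4a", ".aac", ".wma"})),
--     ("video", frozenset({".mp4", ".avi", ".mov", ".mkv", ".webm", ".flv", ".wmv", ".mpg"})),
-- )
-- _KNOWN = frozenset().union(*(exts for _, exts in _CATEGORIES))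
--
--
-- def _detect_modalities_from_extensions(extensions):
--     """Detect modalities: one independent membership scan per modality.
--
--     Correct vs. the cascade version because the four extension sets are
--     pairwise disjoint, so each flag is simply 'some extension lies in that
--     set', and 'other' is 'some extension lies in none of them'.
--     """
--     lowered = [ext.lower() for ext in extensions]
--     modalities = {cat: any(e in exts for e in lowered) for cat, exts in _CATEGORIES}
--     modalities["other"] = any(e not in _KNOWN for e in lowered)
--     return modalities
-- ===== Notes on version B (the rewrite author's own statement) =====
-- stated objective: alternative
-- what changed: Replaced A's single classify-and-flag loop (if/elif/else cascade updating one flag per element) by staged independent passes: lower all extensions once, then compute each modality flag as its own any() membership scan and 'other' as a scan against the union of known extensions; correct because the four extension sets are pairwise disjoint.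
import Mathlib
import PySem

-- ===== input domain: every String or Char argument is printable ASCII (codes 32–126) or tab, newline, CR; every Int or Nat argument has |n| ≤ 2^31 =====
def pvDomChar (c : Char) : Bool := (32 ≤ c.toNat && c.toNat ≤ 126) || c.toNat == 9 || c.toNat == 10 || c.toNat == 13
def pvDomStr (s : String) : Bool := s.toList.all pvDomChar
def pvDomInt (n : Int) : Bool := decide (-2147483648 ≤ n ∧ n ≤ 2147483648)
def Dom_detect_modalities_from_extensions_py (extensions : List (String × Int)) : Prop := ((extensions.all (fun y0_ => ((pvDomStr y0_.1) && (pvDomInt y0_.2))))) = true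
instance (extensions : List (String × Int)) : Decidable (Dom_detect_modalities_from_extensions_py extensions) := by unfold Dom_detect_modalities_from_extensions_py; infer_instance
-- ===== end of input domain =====

-- B replaces A's single classify-and-flag loop (if/elif/else cascade) by one
-- independent membership scan per modality over the lowered extensions
-- (alternative decomposition; correct since the four extension sets are disjoint).

-- ===== PORT A =====
-- Loop body of A's for-loop, lifted to a named helper (literal transliteration).
def pvStepA (m : PySem.Dict String Bool) (p : String × Int) : PySem.Dict String Bool :=
  let ext_lower := PySem.Str.lower p.1
  if PySem.Set.contains (PySem.Set.ofList [".txt", ".md", ".json", ".jsonl", ".csv", ".tsv", ".xml", ".html"]) ext_lower then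
    m.insert "text" true
  else if PySem.Set.contains (PySem.Set.ofList [".jpg", ".jpeg", ".png", ".gif", ".bmp", ".svg", ".webp", ".tiff"]) ext_lower then
    m.insert "image" true
  else if PySem.Set.contains (PySem.Set.ofList [".mp3", ".wav", ".flac", ".ogg", ".m4a", ".aac", ".wma"]) ext_lower then
    m.insert "audio" true
  else if PySem.Set.contains (PySem.Set.ofList [".mp4", ".avi", ".mov", ".mkv", ".webm", ".flv", ".wmv", ".mpg"]) ext_lower then
    m.insert "video" true
  else
    m.insert "other" true

def detect_modalities_from_extensions_py (extensions : List (String × Int)) : List (String × Bool) :=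
  let modalities : PySem.Dict String Bool :=
    PySem.Dict.ofList [("text", false), ("image", false), ("audio", false), ("video", false), ("other", false)]
  (extensions.foldl pvStepA modalities).items

-- ===== PORT B =====
def pvCategories : List (String × List String) :=
  [("text", [".txt", ".md", ".json", ".jsonl", ".csv", ".tsv", ".xml", ".html"]),
   ("image", [".jpg", ".jpeg", ".png", ".gif", ".bmp", ".svg", ".webp", ".tiff"]),
   ("audio", [".mp3", ".wav", ".flac", ".ogg", ".m4a", ".aac", ".wma"]),
   ("video", [".mp4", ".avi", ".mov", ".mkv", ".webm", ".flv", ".wmv", ".mpg"])]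

def pvKnownExts : PySem.Set String :=
  PySem.Set.ofList ((pvCategories.map (·.2)).flatten)

def detect_modalities_from_extensions_py_alt (extensions : List (String × Int)) : List (String × Bool) :=
  let lowered := extensions.map (fun p => PySem.Str.lower p.1)
  let modalities : PySem.Dict String Bool :=
    PySem.Dict.ofList (pvCategories.map (fun c =>
      (c.1, lowered.any (fun e => PySem.Set.contains (PySem.Set.ofList c.2) e))))
  (modalities.insert "other" (lowered.any (fun e => !(PySem.Set.contains pvKnownExts e)))).items

-- ===== PRECONDITION & SPEC =====
def Spec_detect_modalities_from_extensions_py (extensions : List (String × Int)) (out : List (String × Bool)) : Prop := out = detect_modalities_from_extensions_py_alt extensions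
instance (extensions : List (String × Int)) (out : List (String × Bool)) : Decidable (Spec_detect_modalities_from_extensions_py extensions out) := by unfold Spec_detect_modalities_from_extensions_py; infer_instance

-- ===== CLAIM (what is proved, stated in full; the proofs are below) =====
def Claim_equal_detect_modalities_from_extensions_py : Prop := ∀ (extensions : List (String × Int)), Dom_detect_modalities_from_extensions_py extensions → Spec_detect_modalities_from_extensions_py extensions (detect_modalities_from_extensions_py extensions)

-- ===== LEMMAS AND PROOFS =====

def pvMkD (b1 b2 b3 b4 b5 : Bool) : PySem.Dict String Bool :=
  PySem.Dict.mk [("text", b1), ("image", b2), ("audio", b3), ("video", b4), ("other", b5)]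

def pvT (e : String) : Bool := PySem.Set.contains (PySem.Set.ofList [".txt", ".md", ".json", ".jsonl", ".csv", ".tsv", ".xml", ".html"]) e
def pvI (e : String) : Bool := PySem.Set.contains (PySem.Set.ofList [".jpg", ".jpeg", ".png", ".gif", ".bmp", ".svg", ".webp", ".tiff"]) e
def pvA (e : String) : Bool := PySem.Set.contains (PySem.Set.ofList [".mp3", ".wav", ".flac", ".ogg", ".m4a", ".aac", ".wma"]) e
def pvV (e : String) : Bool := PySem.Set.contains (PySem.Set.ofList [".mp4", ".avi", ".mov", ".mkv", ".webm", ".flv", ".wmv", ".mpg"]) e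

theorem pv_ins_text (b1 b2 b3 b4 b5 : Bool) : (pvMkD b1 b2 b3 b4 b5).insert "text" true = pvMkD true b2 b3 b4 b5 := by rfl
theorem pv_ins_image (b1 b2 b3 b4 b5 : Bool) : (pvMkD b1 b2 b3 b4 b5).insert "image" true = pvMkD b1 true b3 b4 b5 := by rfl
theorem pv_ins_audio (b1 b2 b3 b4 b5 : Bool) : (pvMkD b1 b2 b3 b4 b5).insert "audio" true = pvMkD b1 b2 true b4 b5 := by rfl
theorem pv_ins_video (b1 b2 b3 b4 b5 : Bool) : (pvMkD b1 b2 b3 b4 b5).insert "video" true = pvMkD b1 b2 b3 true b5 := by rfl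
theorem pv_ins_other (b1 b2 b3 b4 b5 : Bool) : (pvMkD b1 b2 b3 b4 b5).insert "other" true = pvMkD b1 b2 b3 b4 true := by rfl

-- A's branch cascade on one extension, as a flag update; the four sets are disjoint,
-- so each branch test coincides with plain membership.
theorem pv_classify (s : String) (b1 b2 b3 b4 b5 : Bool) :
    (if pvT s then (pvMkD b1 b2 b3 b4 b5).insert "text" true
     else if pvI s then (pvMkD b1 b2 b3 b4 b5).insert "image" true
     else if pvA s then (pvMkD b1 b2 b3 b4 b5).insert "audio" true
     else if pvV s then (pvMkD b1 b2 b3 b4 b5).insert "video" true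
     else (pvMkD b1 b2 b3 b4 b5).insert "other" true) =
      pvMkD (b1 || pvT s) (b2 || pvI s) (b3 || pvA s) (b4 || pvV s)
            (b5 || !(pvT s || pvI s || pvA s || pvV s)) := by
  by_cases h1 : s ∈ [".txt", ".md", ".json", ".jsonl", ".csv", ".tsv", ".xml", ".html"]
  · have hT : pvT s = true := by simpa [pvT] using h1
    have hI : pvI s = false := by fin_cases h1 <;> decide
    have hA : pvA s = false := by fin_cases h1 <;> decide
    have hV : pvV s = false := by fin_cases h1 <;> decide
    simp [hT, hI, hA, hV, pv_ins_text]
  · have hT : pvT s = false := by simpa [pvT] using h1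
    by_cases h2 : s ∈ [".jpg", ".jpeg", ".png", ".gif", ".bmp", ".svg", ".webp", ".tiff"]
    · have hI : pvI s = true := by simpa [pvI] using h2
      have hA : pvA s = false := by fin_cases h2 <;> decide
      have hV : pvV s = false := by fin_cases h2 <;> decide
      simp [hT, hI, hA, hV, pv_ins_image]
    · have hI : pvI s = false := by simpa [pvI] using h2
      by_cases h3 : s ∈ [".mp3", ".wav", ".flac", ".ogg", ".m4a", ".aac", ".wma"]
      · have hA : pvA s = true := by simpa [pvA] using h3
        have hV : pvV s = false := by fin_cases h3 <;> decide
        simp [hT, hI, hA, hV, pv_ins_audio]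
      · have hA : pvA s = false := by simpa [pvA] using h3
        by_cases h4 : s ∈ [".mp4", ".avi", ".mov", ".mkv", ".webm", ".flv", ".wmv", ".mpg"]
        · have hV : pvV s = true := by simpa [pvV] using h4
          simp [hT, hI, hA, hV, pv_ins_video]
        · have hV : pvV s = false := by simpa [pvV] using h4
          simp [hT, hI, hA, hV, pv_ins_other]

theorem pv_step_eq (b1 b2 b3 b4 b5 : Bool) (p : String × Int) :
    pvStepA (pvMkD b1 b2 b3 b4 b5) p =
      pvMkD (b1 || pvT (PySem.Str.lower p.1)) (b2 || pvI (PySem.Str.lower p.1))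
            (b3 || pvA (PySem.Str.lower p.1)) (b4 || pvV (PySem.Str.lower p.1))
            (b5 || !(pvT (PySem.Str.lower p.1) || pvI (PySem.Str.lower p.1) || pvA (PySem.Str.lower p.1) || pvV (PySem.Str.lower p.1))) := by
  unfold pvStepA
  exact pv_classify (PySem.Str.lower p.1) b1 b2 b3 b4 b5

theorem pv_foldA (l : List (String × Int)) (b1 b2 b3 b4 b5 : Bool) :
    l.foldl pvStepA (pvMkD b1 b2 b3 b4 b5) =
      pvMkD (b1 || l.any (fun p => pvT (PySem.Str.lower p.1)))
            (b2 || l.any (fun p => pvI (PySem.Str.lower p.1)))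
            (b3 || l.any (fun p => pvA (PySem.Str.lower p.1)))
            (b4 || l.any (fun p => pvV (PySem.Str.lower p.1)))
            (b5 || l.any (fun p => !(pvT (PySem.Str.lower p.1) || pvI (PySem.Str.lower p.1) || pvA (PySem.Str.lower p.1) || pvV (PySem.Str.lower p.1)))) := by
  induction l generalizing b1 b2 b3 b4 b5 with
  | nil => simp
  | cons p l ih =>
      rw [List.foldl_cons, pv_step_eq, ih]
      simp [List.any_cons, Bool.or_assoc]

theorem pv_known_eq (e : String) :
    PySem.Set.contains pvKnownExts e = (pvT e || pvI e || pvA e || pvV e) := by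
  rw [Bool.eq_iff_iff]
  simp [pvKnownExts, pvCategories, pvT, pvI, pvA, pvV, PySem.Set.mem_ofList, or_assoc]

theorem pv_b_items (v1 v2 v3 v4 v5 : Bool) :
    ((PySem.Dict.ofList [("text", v1), ("image", v2), ("audio", v3), ("video", v4)]).insert "other" v5).items
      = [("text", v1), ("image", v2), ("audio", v3), ("video", v4), ("other", v5)] := rfl

-- ===== VERDICT (by name: the statement is the Claim_ definition above) =====
theorem detect_modalities_from_extensions_py_spec : Claim_equal_detect_modalities_from_extensions_py := by
  intro extensions _
  unfold Spec_detect_modalities_from_extensions_py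
  unfold detect_modalities_from_extensions_py detect_modalities_from_extensions_py_alt
  dsimp only
  have hinit : PySem.Dict.ofList [("text", false), ("image", false), ("audio", false), ("video", false), ("other", false)] = pvMkD false false false false false := rfl
  rw [hinit, pv_foldA]
  simp only [pvCategories, List.map_cons, List.map_nil]
  rw [pv_b_items]
  simp only [Bool.false_or, List.any_map, pv_known_eq]
  simp [Function.comp_def, pvT, pvI, pvA, pvV, pvMkD]
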